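-- pv_equiv track=rewrite | github.com/Digit4/randoms | sparse_arrays.py | matchingStrings
-- ===== SOURCE A (Python) =====
-- def queryProcessed(ele, arr):
-- 	for var in arr:
-- 		if (ele == var):
-- 			return True
-- 	return False
--
-- def matchingStrings(strings, queries):
-- 	query_count,string_count = len(queries),len(strings)
-- 	result = [0 for x in range(query_count)]
-- 	for i,query in enumerate(queries):
-- 		for string in strings:
-- 			if (query == string):
-- 				if (not queryProcessed(query, queries[:i])):
-- 					ind = i
-- 					result[ind] += 1
-- 				else:
-- 					ind = queries.index(query)
-- 					result[i] = result[ind]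
-- 	return (result)
-- ===== SOURCE B (Python) =====
-- def matchingStrings(strings, queries):
--     counts = {}
--     for s in strings:
--         counts[s] = counts.get(s, 0) + 1
--     return [counts.get(q, 0) for q in queries]
-- ===== Notes on version B (the rewrite author's own statement) =====
-- stated objective: faster
-- what changed: Replace the triple nested scans (for each query, scan all strings, and per match re-scan the query prefix / re-run list.index) with one counting-dict pass over strings followed by a single O(1)-lookup pass over queries.
import Mathlib
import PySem

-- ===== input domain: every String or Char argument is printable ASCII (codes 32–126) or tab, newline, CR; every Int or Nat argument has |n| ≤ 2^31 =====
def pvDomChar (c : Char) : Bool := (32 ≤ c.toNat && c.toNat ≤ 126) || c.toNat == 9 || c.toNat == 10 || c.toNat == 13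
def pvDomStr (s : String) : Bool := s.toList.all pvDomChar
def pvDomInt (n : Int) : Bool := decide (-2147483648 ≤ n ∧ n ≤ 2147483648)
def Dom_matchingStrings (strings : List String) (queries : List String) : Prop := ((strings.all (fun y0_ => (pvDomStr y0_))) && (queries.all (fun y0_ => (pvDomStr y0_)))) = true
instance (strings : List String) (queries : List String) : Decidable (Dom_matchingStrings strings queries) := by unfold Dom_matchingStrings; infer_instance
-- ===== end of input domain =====

-- B replaces A's nested scans with one counting-dict pass over `strings` plus one lookup pass over `queries`.


-- ===== PORT A =====
def queryProcessed (ele : String) (arr : List String) : Bool :=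
  match arr with
  | [] => false
  | var :: rest => if ele == var then true else queryProcessed ele rest

-- indices i / ind come from enumerate / list.index, hence are nonnegative and in range;
-- `result[ind] += 1` / `result[i] = result[ind]` are ported with List.set / List.getD at the Nat index.
def matchingStrings (strings : List String) (queries : List String) : List Int :=
  let query_count : Int := (queries.length : Int)
  let result : List Int := (PySem.List.pyRange 0 query_count 1).map (fun _ => (0 : Int))
  (PySem.List.enumerate queries 0).foldl
    (fun result iq =>
      strings.foldl
        (fun res string =>
          if iq.2 == string then
            if ! queryProcessed iq.2 (PySem.List.slice queries none (some iq.1)) then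
              res.set iq.1.toNat (res.getD iq.1.toNat 0 + 1)
            else
              match PySem.List.index? queries iq.2 with
              | some ind => res.set iq.1.toNat (res.getD ind 0)
              | none => res   -- unreachable: queries.index(query) always succeeds here (query ∈ queries)
          else res)
        result)
    result

-- ===== PORT B =====
def matchingStrings_alt (strings : List String) (queries : List String) : List Int :=
  let counts : PySem.Dict String Int :=
    strings.foldl (fun d s => d.modify s 0 (fun c => c + 1)) (PySem.Dict.mk [])
  queries.map (fun q => counts.getD q 0)

-- ===== PRECONDITION & SPEC =====
def Spec_matchingStrings (strings : List String) (queries : List String) (out : List Int) : Prop := out = matchingStrings_alt strings queries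
instance (strings : List String) (queries : List String) (out : List Int) : Decidable (Spec_matchingStrings strings queries out) := by unfold Spec_matchingStrings; infer_instance

-- ===== CLAIM (what is proved, stated in full; the proofs are below) =====
def Claim_equal_matchingStrings : Prop := ∀ (strings : List String) (queries : List String), Dom_matchingStrings strings queries → Spec_matchingStrings strings queries (matchingStrings strings queries)

-- ===== LEMMAS AND PROOFS =====

lemma queryProcessed_eq (ele : String) (arr : List String) :
    queryProcessed ele arr = arr.contains ele := by
  induction arr with
  | nil => rfl
  | cons v rest ih =>
      unfold queryProcessed
      by_cases h : ele = v
      · simp [h]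
      · simp [h, ih]

-- inner loop, first-occurrence branch: each matching string adds 1 at position k
lemma inner_add (strings : List String) (q : String) (k : Nat) :
    ∀ res : List Int, k < res.length →
      strings.foldl (fun res s => if q == s then res.set k (res.getD k 0 + 1) else res) res
        = res.set k (res.getD k 0 + strings.count q) := by
  induction strings with
  | nil =>
      intro res hk
      simp [List.getD_eq_getElem?_getD, List.getElem?_eq_getElem hk, List.set_getElem_self]
  | cons s t ih =>
      intro res hk
      simp only [List.foldl_cons]
      by_cases h : q = s
      · rw [if_pos (by simp [h]), ih _ (by simpa using hk)]
        simp [List.getD_eq_getElem?_getD, List.getElem?_set_self hk, List.set_set, h, add_assoc]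
        ring_nf
      · rw [if_neg (by simp [h]), ih _ hk, List.count_cons]
        simp [Ne.symm h]

-- inner loop, repeated-query branch: position k is overwritten with res[ind] (ind ≠ k) iff some string matches
lemma inner_copy (strings : List String) (q : String) (k ind : Nat) (hne : ind ≠ k) :
    ∀ res : List Int, k < res.length →
      strings.foldl (fun res s => if q == s then res.set k (res.getD ind 0) else res) res
        = if strings.contains q then res.set k (res.getD ind 0) else res := by
  induction strings with
  | nil => intro res hk; simp
  | cons s t ih =>
      intro res hk
      simp only [List.foldl_cons]
      have hd : (res.set k (res.getD ind 0))[ind]?.getD 0 = res[ind]?.getD 0 := by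
        rw [List.getElem?_set_ne (Ne.symm hne)]
      by_cases h : q = s
      · rw [if_pos (by simp [h]), ih _ (by simpa using hk)]
        split_ifs with hc <;> simp_all [List.getD_eq_getElem?_getD, List.set_set]
      · rw [if_neg (by simp [h]), ih _ hk]
        simp [h]

-- one outer iteration, invariant in force: the inner loop sets slot k to the count of q in strings
lemma outer_step (strings queries : List String) (k : Nat) (q : String) (res : List Int)
    (hklt : k < queries.length)
    (hlen : res.length = queries.length)
    (h1 : ∀ j : Nat, j < queries.length → j < k → res.getD j 0 = (strings.count queries[j]! : Int))
    (h2 : ∀ j : Nat, j < queries.length → k ≤ j → res.getD j 0 = 0) :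
    strings.foldl
      (fun res string =>
        if q == string then
          if ! (queries.take k).contains q then
            res.set k (res.getD k 0 + 1)
          else
            match PySem.List.index? queries q with
            | some ind => res.set k (res.getD ind 0)
            | none => res
        else res) res
    = res.set k (strings.count q : Int) := by
  have hkres : k < res.length := by omega
  have hres0 : res.getD k 0 = 0 := h2 k hklt le_rfl
  by_cases hin : q ∈ queries.take k
  · have hc : (queries.take k).contains q = true := by simpa using hin
    have hmem : q ∈ queries := List.mem_of_mem_take hin
    obtain ⟨ind, hind⟩ : ∃ ind, PySem.List.index? queries q = some ind :=
      Option.isSome_iff_exists.mp ((PySem.List.index?_isSome_iff queries q).2 hmem)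
    obtain ⟨hkind, hqind, hmin⟩ := PySem.List.getElem_of_index?_eq_some hind
    obtain ⟨j, hjlen, hjeq⟩ := List.getElem_of_mem hin
    have hjq : queries[j]'(by simp at hjlen; omega) = q := by
      rw [← hjeq]; exact (List.getElem_take).symm
    have hindk : ind < k := by
      by_contra hcon
      exact hmin j (by simp at hjlen; omega) hjq
    have hval : res.getD ind 0 = (strings.count q : Int) := by
      have := h1 ind hkind hindk
      rw [this, getElem!_pos queries ind hkind, hqind]
    simp only [hc, Bool.not_true, Bool.false_eq_true, if_false, hind]
    rw [inner_copy strings q k ind (by omega) res hkres]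
    split_ifs with hcs
    · rw [hval]
    · have hcnt : strings.count q = 0 := by
        rw [List.count_eq_zero]; simpa using hcs
      rw [hcnt]
      have : res.getD k 0 = res[k] := by
        rw [List.getD_eq_getElem?_getD, List.getElem?_eq_getElem hkres]; rfl
      rw [show ((0:Nat):Int) = res[k] by rw [← this, hres0]; simp]
      exact (List.set_getElem_self hkres).symm
  · have hc : (queries.take k).contains q = false := by simpa using hin
    simp only [hc, Bool.not_false, if_true]
    rw [inner_add strings q k res hkres, hres0, zero_add]

-- when every processed slot already holds its count, the result list IS the count map
lemma res_done (strings queries : List String) (k : Nat) (res : List Int)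
    (hk : queries.length ≤ k) (hlen : res.length = queries.length)
    (h1 : ∀ j : Nat, j < queries.length → j < k → res.getD j 0 = (strings.count queries[j]! : Int)) :
    res = queries.map (fun q => (strings.count q : Int)) := by
  apply List.ext_getElem (by simp [hlen])
  intro j h1' h2'
  have hj : j < queries.length := by simpa using h2'
  have := h1 j hj (lt_of_lt_of_le hj hk)
  rw [List.getD_eq_getElem?_getD, List.getElem?_eq_getElem h1'] at this
  simp [List.getElem?_eq_getElem hj] at this
  simp [this]

-- A's outer-loop body, named so the invariant lemma can talk about it (definitionally A's lambda)
def stepA (strings queries : List String) (result : List Int) (iq : Int × String) : List Int :=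
  strings.foldl
    (fun res string =>
      if iq.2 == string then
        if ! queryProcessed iq.2 (PySem.List.slice queries none (some iq.1)) then
          res.set iq.1.toNat (res.getD iq.1.toNat 0 + 1)
        else
          match PySem.List.index? queries iq.2 with
          | some ind => res.set iq.1.toNat (res.getD ind 0)
          | none => res
      else res)
    result

-- outer loop invariant: processed prefix holds the counts, the rest is still 0
lemma outer_inv (strings queries : List String) :
    ∀ (fuel k : Nat) (res : List Int), queries.length - k ≤ fuel →
      res.length = queries.length →
      (∀ j : Nat, j < queries.length → j < k → res.getD j 0 = (strings.count queries[j]! : Int)) →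
      (∀ j : Nat, j < queries.length → k ≤ j → res.getD j 0 = 0) →
      (PySem.List.enumerate (queries.drop k) (k : Int)).foldl (stepA strings queries) res
      = queries.map (fun q => (strings.count q : Int)) := by
  intro fuel
  induction fuel with
  | zero =>
      intro k res hfuel hlen h1 h2
      have hk : queries.length ≤ k := by omega
      rw [List.drop_eq_nil_of_le hk]
      simpa using res_done strings queries k res hk hlen h1
  | succ fuel ih =>
      intro k res hfuel hlen h1 h2
      by_cases hk : queries.length ≤ k
      · rw [List.drop_eq_nil_of_le hk]
        simpa using res_done strings queries k res hk hlen h1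
      · have hklt : k < queries.length := by omega
        rw [List.drop_eq_getElem_cons hklt, PySem.List.enumerate_cons, List.foldl_cons]
        have hhead : stepA strings queries res ((k : Int), queries[k]'hklt)
            = res.set k (strings.count (queries[k]'hklt) : Int) := by
          unfold stepA
          simp only [Int.toNat_natCast, PySem.List.slice_to _ (Int.natCast_nonneg k),
            queryProcessed_eq]
          exact outer_step strings queries k (queries[k]'hklt) res hklt hlen h1 h2
        rw [hhead, show ((k:Int)+1) = ((k+1:Nat):Int) by push_cast; ring]
        apply ih (k+1) _ (by omega) (by simp [hlen])
        · intro j hj hjk1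
          by_cases hjk : j = k
          · subst hjk
            rw [List.getD_eq_getElem?_getD, List.getElem?_set_self (by omega)]
            simp [getElem!_pos queries j hj]
          · rw [List.getD_eq_getElem?_getD, List.getElem?_set_ne (fun h => hjk h.symm),
              ← List.getD_eq_getElem?_getD]
            exact h1 j hj (by omega)
        · intro j hj hjk1
          rw [List.getD_eq_getElem?_getD, List.getElem?_set_ne (by omega),
            ← List.getD_eq_getElem?_getD]
          exact h2 j hj (by omega)

lemma matchingStrings_eq_counts (strings queries : List String) :
    matchingStrings strings queries = queries.map (fun q => (strings.count q : Int)) := by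
  show (PySem.List.enumerate queries 0).foldl (stepA strings queries)
      ((PySem.List.pyRange 0 (queries.length : Int) 1).map (fun _ => (0 : Int)))
    = queries.map (fun q => (strings.count q : Int))
  have hinit : (PySem.List.pyRange 0 (queries.length : Int) 1).map (fun _ => (0 : Int))
      = List.replicate queries.length (0 : Int) := by
    rw [PySem.List.pyRange_zero_natCast, List.map_map]
    simp [Function.comp_def]
  rw [hinit]
  have h0 : ∀ j : Nat, (List.replicate queries.length (0 : Int)).getD j 0 = 0 := by
    intro j
    rw [List.getD_eq_getElem?_getD]
    cases hx : (List.replicate queries.length (0 : Int))[j]? with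
    | none => rfl
    | some x =>
        have := List.mem_of_getElem? hx
        simp [List.eq_of_mem_replicate this]
  have := outer_inv strings queries queries.length 0
    (List.replicate queries.length (0 : Int)) (by omega) (by simp)
    (by intro j hj hj0; omega) (by intro j hj _; exact h0 j)
  simpa using this

lemma matchingStrings_alt_eq_counts (strings queries : List String) :
    matchingStrings_alt strings queries = queries.map (fun q => (strings.count q : Int)) := by
  unfold matchingStrings_alt
  refine List.map_congr_left (fun q _ => ?_)
  rw [PySem.Dict.getD_foldl_modify_add_one]
  simp [PySem.Dict.getD, PySem.Dict.get?]

-- ===== VERDICT (by name: the statement is the Claim_ definition above) =====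
theorem matchingStrings_spec : Claim_equal_matchingStrings := by
  intro strings queries _
  unfold Spec_matchingStrings
  rw [matchingStrings_eq_counts, matchingStrings_alt_eq_counts]
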